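-- pv_equiv track=rewrite | github.com/KomendaKacper/BO | Hungarian.py | wykreslanie_zer_min_linii
-- ===== SOURCE A (Python) =====
-- def wykreslanie_zer_min_linii(koszty):
--     # Krok 1: Znalezienie minimum w każdym wierszu
--     min_wierszy = [min(wiersz) for wiersz in koszty]
--
--     # Krok 2: Znalezienie minimum w każdej kolumnie
--     min_kolumn = [min(koszty[i][j] for i in range(len(koszty))) for j in range(len(koszty[0]))]
--
--     # Krok 3: Inicjalizacja tablicy zaznaczeń dla wierszy i kolumn
--     zaznaczone_wiersze = [False] * len(koszty)
--     zaznaczone_kolumny = [False] * len(koszty[0])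
--
--     # Krok 4: Zaznaczanie zer, które pokrywają się z minimalnymi wartościami z Kroków 1 i 2
--     for i in range(len(koszty)):
--         for j in range(len(koszty[i])):
--             if koszty[i][j] == min_wierszy[i] and koszty[i][j] == min_kolumn[j]:
--                 zaznaczone_wiersze[i] = True
--                 zaznaczone_kolumny[j] = True
--
--     # Krok 5: Inicjalizacja tablicy rzędów i kolumn
--     rzedy_do_wykreslenia = [i for i, zaznaczony in enumerate(zaznaczone_wiersze) if not zaznaczony]
--     kolumny_do_wykreslenia = [j for j, zaznaczony in enumerate(zaznaczone_kolumny) if zaznaczony]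
--
--     return rzedy_do_wykreslenia, kolumny_do_wykreslenia
-- ===== SOURCE B (Python) =====
-- def wykreslanie_zer_min_linii(koszty):
--     # Fused column-streaming pass: one walk down each column maintains the running
--     # column minimum together with the candidate rows attaining it (resetting them
--     # when a smaller value appears), so no column-minimum array and no boolean
--     # mark arrays are ever built; marked rows accumulate in a set.
--     n, m = len(koszty), len(koszty[0])
--     min_wierszy = [min(w) for w in koszty]
--     zaznaczone = set()
--     kolumny_do_wykreslenia = []
--     for j in range(m):
--         cur = None
--         hits = []
--         for i in range(n):
--             v = koszty[i][j]
--             if cur is None or v < cur: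
--                 cur = v
--                 hits = []
--             if v == cur and v == min_wierszy[i]:
--                 hits.append(i)
--         if hits:
--             kolumny_do_wykreslenia.append(j)
--             zaznaczone.update(hits)
--     rzedy_do_wykreslenia = [i for i in range(n) if i not in zaznaczone]
--     return rzedy_do_wykreslenia, kolumny_do_wykreslenia
-- ===== Notes on version B (the rewrite author's own statement) =====
-- stated objective: alternative
-- what changed: Replaces A's precomputed column-minimum array plus boolean mark-array marking loop by a fused streaming pass down each column that maintains the running column minimum together with the candidate rows attaining it (reset when a smaller value appears), accumulating marked rows in a set; no min_kolumn array and no zaznaczone_* arrays exist.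
-- outside the precondition, e.g. on wykreslanie_zer_min_linii([[0, 1], [5, 1, 2]]): A returns ([], [0, 1]), B returns ([], [0, 1]); on wykreslanie_zer_min_linii([]): A raises IndexError, B raises IndexError
import Mathlib
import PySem

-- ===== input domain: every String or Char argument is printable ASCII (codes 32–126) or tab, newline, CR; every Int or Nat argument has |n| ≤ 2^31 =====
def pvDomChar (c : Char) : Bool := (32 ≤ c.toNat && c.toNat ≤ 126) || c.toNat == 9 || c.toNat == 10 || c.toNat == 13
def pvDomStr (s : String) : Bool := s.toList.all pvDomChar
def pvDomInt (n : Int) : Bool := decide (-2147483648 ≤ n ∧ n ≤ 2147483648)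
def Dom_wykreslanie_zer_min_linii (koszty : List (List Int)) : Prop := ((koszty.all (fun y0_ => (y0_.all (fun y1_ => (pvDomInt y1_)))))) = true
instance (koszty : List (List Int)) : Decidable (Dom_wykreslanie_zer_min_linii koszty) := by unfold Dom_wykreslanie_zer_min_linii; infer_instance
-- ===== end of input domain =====

-- B replaces A's precomputed column-minimum array and boolean mark-array loop by a
-- fused streaming pass down each column (running column minimum + candidate rows,
-- reset on a smaller value), accumulating marked rows in a set (objective: alternative).

-- ===== PORT A =====
-- Python's min(xs) (exact for xs ≠ []; Pre_ keeps rows nonempty)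
def pyMin (xs : List Int) : Int := (PySem.List.min? xs (fun x => x)).getD 0

-- Kroki 3-4: the nested marking loop over the two boolean arrays
def zaznacz (koszty : List (List Int)) (minW minK : List Int) : List Bool × List Bool :=
  (List.range koszty.length).foldl (fun st i =>
    (List.range ((koszty.getD i []).length)).foldl (fun (st2 : List Bool × List Bool) j =>
      if (koszty.getD i []).getD j 0 = minW.getD i 0 ∧
         (koszty.getD i []).getD j 0 = minK.getD j 0
      then (st2.1.set i true, st2.2.set j true) else st2) st)
    (List.replicate koszty.length false, List.replicate ((koszty.headD []).length) false)

def wykreslanie_zer_min_linii (koszty : List (List Int)) : List Int × List Int :=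
  let minW := koszty.map pyMin
  let minK := (List.range ((koszty.headD []).length)).map
    (fun j => pyMin (koszty.map (fun w => w.getD j 0)))
  let mark := zaznacz koszty minW minK
  let rzedy := ((PySem.List.enumerate mark.1 0).filter (fun p => !p.2)).map (·.1)
  let kolumny := ((PySem.List.enumerate mark.2 0).filter (fun p => p.2)).map (·.1)
  (rzedy, kolumny)

-- ===== PORT B =====
-- the body of B's inner loop over rows i of column j (running min `cur`, candidates `hits`)
def kolumnaKrok (koszty : List (List Int)) (minW : List Int) (j : Nat)
    (st : Option Int × List Int) (i : Nat) : Option Int × List Int :=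
  let v := (koszty.getD i []).getD j 0
  let st1 : Int × List Int :=
    match st.1 with
    | none => (v, [])
    | some c => if v < c then (v, []) else (c, st.2)
  if v = st1.1 ∧ v = minW.getD i 0 then (some st1.1, st1.2 ++ [(i : Int)])
  else (some st1.1, st1.2)

def wykreslanie_zer_min_linii_alt (koszty : List (List Int)) : List Int × List Int :=
  let n := koszty.length
  let m := (koszty.headD []).length
  let minW := koszty.map pyMin
  let st := (List.range m).foldl (fun (st : PySem.Set Int × List Int) j =>
      let hits := ((List.range n).foldl (kolumnaKrok koszty minW j) (none, [])).2
      if hits ≠ [] then (PySem.Set.update st.1 hits, st.2 ++ [(j : Int)]) else st)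
    (PySem.Set.empty, [])
  let rzedy := ((List.range n).filter (fun (i : Nat) => !(PySem.Set.contains st.1 ((i : Nat) : Int)))).map
      (fun (i : Nat) => (i : Int))
  (rzedy, st.2)

-- ===== PRECONDITION & SPEC =====
-- Pre_ excludes the empty matrix, empty rows and ragged rows: there Python A raises
-- (ValueError on min([]), IndexError on missing column entries) except on some ragged
-- inputs where raising depends on data coincidences; the Hungarian method's natural
-- domain is a nonempty rectangular matrix.
def Pre_wykreslanie_zer_min_linii (koszty : List (List Int)) : Prop :=
  koszty ≠ [] ∧ 0 < (koszty.headD []).length ∧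
    ∀ w ∈ koszty, w.length = (koszty.headD []).length
instance (koszty : List (List Int)) : Decidable (Pre_wykreslanie_zer_min_linii koszty) := by
  unfold Pre_wykreslanie_zer_min_linii; infer_instance

def pvWitness_wykreslanie_zer_min_linii : List (List Int) := [[0, 1], [2, 0]]

def Spec_wykreslanie_zer_min_linii (koszty : List (List Int)) (out : List Int × List Int) : Prop := out = wykreslanie_zer_min_linii_alt koszty
instance (koszty : List (List Int)) (out : List Int × List Int) : Decidable (Spec_wykreslanie_zer_min_linii koszty out) := by unfold Spec_wykreslanie_zer_min_linii; infer_instance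

-- ===== CLAIM (what is proved, stated in full; the proofs are below) =====
def Claim_equal_wykreslanie_zer_min_linii : Prop := ∀ (koszty : List (List Int)), Dom_wykreslanie_zer_min_linii koszty → Pre_wykreslanie_zer_min_linii koszty → Spec_wykreslanie_zer_min_linii koszty (wykreslanie_zer_min_linii koszty)

-- ===== LEMMAS AND PROOFS =====

-- ---- A-side characterisation (the marking loop) ----

theorem getD_set_true (bs : List Bool) (i k : Nat) (h : i < bs.length) :
    (bs.set i true).getD k false = if i = k then true else bs.getD k false := by
  by_cases hk : k < bs.length
  · rw [List.getD_eq_getElem?_getD, List.getElem?_set]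
    by_cases hik : i = k <;> simp [hik, hk, List.getD_eq_getElem?_getD]
  · have hik : i ≠ k := by omega
    have h1 : (bs.set i true)[k]? = none := List.getElem?_eq_none_iff.mpr (by simp; omega)
    have h2 : bs[k]? = none := List.getElem?_eq_none_iff.mpr (by omega)
    simp [hik, List.getD_eq_getElem?_getD, h1, h2]

theorem inner_fold_spec (C : Nat → Nat → Prop) [inst : ∀ i j, Decidable (C i j)] (i : Nat)
    (J : List Nat) (st : List Bool × List Bool)
    (hi : i < st.1.length) (hJ : ∀ j ∈ J, j < st.2.length) :
    (J.foldl (fun (st2 : List Bool × List Bool) j =>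
        if C i j then (st2.1.set i true, st2.2.set j true) else st2) st).1.length = st.1.length ∧
    (J.foldl (fun (st2 : List Bool × List Bool) j =>
        if C i j then (st2.1.set i true, st2.2.set j true) else st2) st).2.length = st.2.length ∧
    (∀ k, (J.foldl (fun (st2 : List Bool × List Bool) j =>
        if C i j then (st2.1.set i true, st2.2.set j true) else st2) st).1.getD k false
      = (st.1.getD k false || (decide (i = k) && J.any (fun j => decide (C i j))))) ∧
    (∀ k, (J.foldl (fun (st2 : List Bool × List Bool) j =>
        if C i j then (st2.1.set i true, st2.2.set j true) else st2) st).2.getD k false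
      = (st.2.getD k false || J.any (fun j => decide (j = k) && decide (C i j)))) := by
  induction J generalizing st with
  | nil => simp
  | cons j J ih =>
    simp only [List.foldl_cons]
    by_cases hc : C i j
    · simp only [if_pos hc]
      obtain ⟨l1, l2, h1, h2⟩ := ih (st.1.set i true, st.2.set j true) (by simpa using hi)
        (fun x hx => by simpa using hJ x (List.mem_cons_of_mem _ hx))
      refine ⟨by simpa using l1, by simpa using l2, ?_, ?_⟩
      · intro k
        rw [h1 k, getD_set_true st.1 i k hi]
        by_cases hik : i = k
        · simp [hik]; exact Or.inr (Or.inl (hik ▸ hc))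
        · simp [hik]
      · intro k
        rw [h2 k, getD_set_true st.2 j k (hJ j (List.mem_cons_self))]
        by_cases hjk : j = k
        · simp [hjk, Bool.or_comm, Bool.or_assoc]; exact Or.inl (hjk ▸ hc)
        · simp [hjk]
    · simp only [if_neg hc]
      obtain ⟨l1, l2, h1, h2⟩ := ih st hi (fun x hx => hJ x (List.mem_cons_of_mem _ hx))
      refine ⟨l1, l2, ?_, ?_⟩
      · intro k; rw [h1 k]; simp [hc]
      · intro k; rw [h2 k]; simp [hc]

theorem outer_fold_spec (C : Nat → Nat → Prop) [inst : ∀ i j, Decidable (C i j)]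
    (J : Nat → List Nat) (I : List Nat) (st : List Bool × List Bool)
    (hI : ∀ i ∈ I, i < st.1.length) (hJ : ∀ i ∈ I, ∀ j ∈ J i, j < st.2.length) :
    (I.foldl (fun st i => (J i).foldl (fun (st2 : List Bool × List Bool) j =>
        if C i j then (st2.1.set i true, st2.2.set j true) else st2) st) st).1.length = st.1.length ∧
    (I.foldl (fun st i => (J i).foldl (fun (st2 : List Bool × List Bool) j =>
        if C i j then (st2.1.set i true, st2.2.set j true) else st2) st) st).2.length = st.2.length ∧
    (∀ k, (I.foldl (fun st i => (J i).foldl (fun (st2 : List Bool × List Bool) j =>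
        if C i j then (st2.1.set i true, st2.2.set j true) else st2) st) st).1.getD k false
      = (st.1.getD k false || I.any (fun i => decide (i = k) && (J i).any (fun j => decide (C i j))))) ∧
    (∀ k, (I.foldl (fun st i => (J i).foldl (fun (st2 : List Bool × List Bool) j =>
        if C i j then (st2.1.set i true, st2.2.set j true) else st2) st) st).2.getD k false
      = (st.2.getD k false || I.any (fun i => (J i).any (fun j => decide (j = k) && decide (C i j))))) := by
  induction I generalizing st with
  | nil => simp
  | cons i I ih =>
    simp only [List.foldl_cons]
    obtain ⟨a1, a2, b1, b2⟩ := inner_fold_spec C i (J i) st (hI i List.mem_cons_self)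
      (hJ i List.mem_cons_self)
    obtain ⟨l1, l2, h1, h2⟩ := ih ((J i).foldl (fun (st2 : List Bool × List Bool) j =>
        if C i j then (st2.1.set i true, st2.2.set j true) else st2) st)
      (fun x hx => a1 ▸ hI x (List.mem_cons_of_mem _ hx))
      (fun x hx y hy => a2 ▸ hJ x (List.mem_cons_of_mem _ hx) y hy)
    refine ⟨l1.trans a1, l2.trans a2, ?_, ?_⟩
    · intro k
      rw [h1 k, b1 k]
      simp [Bool.or_assoc]
    · intro k
      rw [h2 k, b2 k]
      simp [Bool.or_assoc]

theorem any_range_collapse (n k : Nat) (f : Nat → Bool) :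
    (List.range n).any (fun i => decide (i = k) && f i) = (decide (k < n) && f k) := by
  apply Bool.eq_iff_iff.mpr
  simp only [List.any_eq_true, List.mem_range, Bool.and_eq_true, decide_eq_true_eq]
  constructor
  · rintro ⟨i, hi, rfl, hf⟩; exact ⟨hi, hf⟩
  · rintro ⟨hk, hf⟩; exact ⟨k, hk, rfl, hf⟩

theorem getD_replicate_false (m k : Nat) : (List.replicate m false).getD k false = false := by
  rw [List.getD_eq_getElem?_getD, List.getElem?_replicate]
  by_cases h : k < m <;> simp [h]

theorem zaznacz_spec (K : List (List Int)) (mW mK : List Int)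
    (hrow : ∀ i, i < K.length → (K.getD i []).length = (K.headD []).length) :
    (zaznacz K mW mK).1.length = K.length ∧
    (zaznacz K mW mK).2.length = (K.headD []).length ∧
    (∀ k, (zaznacz K mW mK).1.getD k false
      = (decide (k < K.length) && (List.range ((K.getD k []).length)).any (fun j =>
          decide ((K.getD k []).getD j 0 = mW.getD k 0 ∧ (K.getD k []).getD j 0 = mK.getD j 0)))) ∧
    (∀ k, (zaznacz K mW mK).2.getD k false
      = (List.range K.length).any (fun i =>
          decide (k < (K.headD []).length) &&
          decide ((K.getD i []).getD k 0 = mW.getD i 0 ∧ (K.getD i []).getD k 0 = mK.getD k 0))) := by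
  unfold zaznacz
  have hIb : ∀ i ∈ List.range K.length,
      i < ((List.replicate K.length false, List.replicate ((K.headD []).length) false) :
        List Bool × List Bool).1.length := by simp
  have hJb : ∀ i ∈ List.range K.length, ∀ j ∈ List.range ((K.getD i []).length),
      j < ((List.replicate K.length false, List.replicate ((K.headD []).length) false) :
        List Bool × List Bool).2.length := by
    intro i hi j hj
    simp only [List.mem_range] at hi hj
    simp only [List.length_replicate]
    rw [← hrow i hi]
    exact hj
  obtain ⟨Hl1, Hl2, Hg1, Hg2⟩ := outer_fold_spec
    (fun i j => (K.getD i []).getD j 0 = mW.getD i 0 ∧ (K.getD i []).getD j 0 = mK.getD j 0)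
    (fun i => List.range ((K.getD i []).length)) (List.range K.length)
    (List.replicate K.length false, List.replicate ((K.headD []).length) false) hIb hJb
  refine ⟨by exact Hl1.trans (by simp), by exact Hl2.trans (by simp), ?_, ?_⟩
  · intro k
    have h := Hg1 k
    rw [getD_replicate_false, Bool.false_or, any_range_collapse] at h
    exact h
  · intro k
    have h := Hg2 k
    rw [getD_replicate_false, Bool.false_or] at h
    refine h.trans (PySem.List.any_congr_mem ?_)
    intro i hi
    rw [hrow i (List.mem_range.mp hi), any_range_collapse]

-- enumerate-filter of a boolean list = index filter (general test on the flag)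
theorem enum_filter_f (bs : List Bool) (s : Int) (f : Bool → Bool) :
    ((PySem.List.enumerate bs s).filter (fun p => f p.2)).map (·.1)
      = ((List.range bs.length).filter (fun k => f (bs.getD k false))).map (fun (k : Nat) => s + (k : Int)) := by
  induction bs generalizing s with
  | nil => simp
  | cons b t ih =>
    rw [PySem.List.enumerate_cons, List.length_cons, List.range_succ_eq_map]
    simp only [List.filter_cons, List.getD_cons_zero, List.filter_map,
      Function.comp_def, List.getD_cons_succ]
    have hrest : ((List.range t.length).filter (fun k => f (t.getD k false))).map
          (fun (k : Nat) => (s + 1) + (k : Int))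
        = ((List.range t.length).filter (fun k => f (t.getD k false))).map
          (fun (k : Nat) => s + ((k.succ : Nat) : Int)) := by
      apply List.map_congr_left; intro x hx; push_cast; ring
    by_cases hb : f b = true
    · rw [if_pos hb, if_pos hb]
      simp only [List.map_cons]
      rw [ih (s + 1), hrest]
      simp [List.map_map, Function.comp_def]
    · simp only [Bool.not_eq_true] at hb
      rw [if_neg (by simp [hb]), if_neg (by simp [hb])]
      rw [ih (s + 1), hrest, List.map_map]
      simp [Function.comp_def]

-- ---- B-side characterisation (the streaming column pass) ----

-- the j-th entry of row i (0 fallback; rows are rectangular under Pre_)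
def vv (K : List (List Int)) (j i : Nat) : Int := (K.getD i []).getD j 0

-- running minimum of column j over the first k rows
def cmin (K : List (List Int)) (j : Nat) : Nat → Int
  | 0 => vv K j 0
  | k + 1 => min (cmin K j k) (vv K j k)

theorem cmin_le (K : List (List Int)) (j : Nat) : ∀ k i, i < k → cmin K j k ≤ vv K j i := by
  intro k
  induction k with
  | zero => intro i hi; omega
  | succ k ih =>
    intro i hi
    rcases Nat.lt_succ_iff_lt_or_eq.mp hi with h | h
    · exact le_trans (min_le_left _ _) (ih i h)
    · subst h; exact min_le_right _ _

theorem krok_none (K : List (List Int)) (minW : List Int) (j i : Nat) (H : List Int) :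
    kolumnaKrok K minW j (none, H) i =
      if vv K j i = minW.getD i 0 then (some (vv K j i), [(i : Int)])
      else (some (vv K j i), []) := by
  simp only [kolumnaKrok, vv]
  by_cases h : (K.getD i []).getD j 0 = minW.getD i 0 <;> simp [h]

theorem krok_some (K : List (List Int)) (minW : List Int) (j i : Nat) (c : Int) (H : List Int) :
    kolumnaKrok K minW j (some c, H) i =
      if vv K j i < c then
        (if vv K j i = minW.getD i 0 then (some (vv K j i), [(i : Int)])
         else (some (vv K j i), []))
      else
        (if vv K j i = c ∧ vv K j i = minW.getD i 0 then (some c, H ++ [(i : Int)])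
         else (some c, H)) := by
  simp only [kolumnaKrok, vv]
  by_cases h1 : (K.getD i []).getD j 0 < c
  · simp only [if_pos h1]
    by_cases h2 : (K.getD i []).getD j 0 = minW.getD i 0 <;> simp [h2]
  · simp only [if_neg h1]
    by_cases h2 : (K.getD i []).getD j 0 = c ∧ (K.getD i []).getD j 0 = minW.getD i 0 <;>
      simp [h2]

theorem stream_spec (K : List (List Int)) (minW : List Int) (j : Nat) :
    ∀ k, 0 < k →
    (List.range k).foldl (kolumnaKrok K minW j) (none, []) =
      (some (cmin K j k),
       ((List.range k).filter (fun i =>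
          decide (vv K j i = cmin K j k ∧ vv K j i = minW.getD i 0))).map
         (fun (i : Nat) => (i : Int))) := by
  intro k
  induction k with
  | zero => intro h; omega
  | succ k ih =>
    intro _
    rcases Nat.eq_zero_or_pos k with hk | hk
    · subst hk
      simp only [List.range_succ, List.range_zero, List.nil_append, List.foldl_cons, List.foldl_nil]
      rw [krok_none]
      have hc : cmin K j 1 = vv K j 0 := min_self (vv K j 0)
      rw [hc, List.filter_cons, List.filter_nil]
      by_cases h0 : vv K j 0 = minW.getD 0 0
      · rw [if_pos h0, if_pos (by simp only [decide_eq_true_eq]; exact ⟨by trivial, h0⟩)]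
        simp
      · rw [if_neg h0, if_neg (by simp only [decide_eq_true_eq, not_and]; exact fun _ => h0)]
        simp
    · rw [List.range_succ, List.foldl_append, List.foldl_cons, List.foldl_nil, ih hk,
        krok_some, List.filter_append, List.filter_cons, List.filter_nil]
      by_cases hlt : vv K j k < cmin K j k
      · have hc : cmin K j (k + 1) = vv K j k := by
          simp [cmin, min_eq_right (le_of_lt hlt)]
        have hfil : (List.range k).filter (fun i =>
            decide (vv K j i = cmin K j (k+1) ∧ vv K j i = minW.getD i 0)) = [] := by
          apply List.filter_eq_nil_iff.mpr
          intro i hi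
          simp only [decide_eq_true_eq, not_and]
          intro h1
          exfalso
          have := cmin_le K j k i (List.mem_range.mp hi)
          rw [hc] at h1; omega
        rw [if_pos hlt, hfil, hc]
        by_cases hmw : vv K j k = minW.getD k 0
        · rw [if_pos hmw, if_pos (by simp only [decide_eq_true_eq]; exact ⟨by trivial, hmw⟩)]
          simp
        · rw [if_neg hmw, if_neg (by simp only [decide_eq_true_eq, not_and]; exact fun _ => hmw)]
          simp
      · have hge : cmin K j k ≤ vv K j k := le_of_not_gt hlt
        have hc : cmin K j (k + 1) = cmin K j k := by
          simp [cmin, min_eq_left hge]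
        rw [if_neg hlt, hc]
        by_cases hp : vv K j k = cmin K j k ∧ vv K j k = minW.getD k 0
        · rw [if_pos hp, if_pos (by simp only [decide_eq_true_eq]; exact hp)]
          simp
        · rw [if_neg hp, if_neg (by simp only [decide_eq_true_eq]; exact hp)]
          simp

-- the streaming minimum over the whole (nonempty) column IS A's column minimum
theorem cmin_eq_pyMin (w : List Int) (rest : List (List Int)) (j : Nat) :
    cmin (w :: rest) j (w :: rest).length
      = pyMin ((w :: rest).map (fun u => u.getD j 0)) := by
  have key : ∀ k, cmin (w :: rest) j (k + 1)
      = ((List.range k).map (fun i => vv rest j i)).foldl min (w.getD j 0) := by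
    intro k
    induction k with
    | zero => simp [cmin, vv]
    | succ k ih =>
      have hv : vv (w :: rest) j (k + 1) = vv rest j k := by simp [vv]
      show min (cmin (w :: rest) j (k + 1)) (vv (w :: rest) j (k + 1)) = _
      rw [ih, hv, List.range_succ, List.map_append, List.foldl_append]
      simp
  have hmap : (List.range rest.length).map (fun i => vv rest j i)
      = rest.map (fun u => u.getD j 0) := by
    apply List.ext_getElem (by simp)
    intro i h1 h2
    simp only [List.getElem_map, List.getElem_range, vv]
    rw [List.getD_eq_getElem rest [] (by simpa using h2)]
  rw [show (w :: rest).length = rest.length + 1 from rfl, key, hmap,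
    List.map_cons, pyMin, PySem.List.min?_id_cons]
  rfl

-- membership in the fold that accumulates marked rows
theorem mem_foldl_update (l : List Nat) (h : Nat → List Int) (S : PySem.Set Int) (x : Int) :
    x ∈ l.foldl (fun s j => if h j ≠ [] then PySem.Set.update s (h j) else s) S
      ↔ x ∈ S ∨ ∃ j ∈ l, x ∈ h j := by
  induction l generalizing S with
  | nil => simp
  | cons j l ih =>
    simp only [List.foldl_cons]
    by_cases hj : h j ≠ []
    · rw [if_pos hj, ih, PySem.Set.mem_update]
      constructor
      · rintro (⟨hs | hh⟩ | ⟨b, hb, hx⟩)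
        · exact Or.inl hs
        · exact Or.inr ⟨j, List.mem_cons_self, hh⟩
        · exact Or.inr ⟨b, List.mem_cons_of_mem _ hb, hx⟩
      · rintro (hs | ⟨b, hb, hx⟩)
        · exact Or.inl (Or.inl hs)
        · rcases List.mem_cons.mp hb with rfl | hb
          · exact Or.inl (Or.inr hx)
          · exact Or.inr ⟨b, hb, hx⟩
    · rw [if_neg hj]
      push_neg at hj
      rw [ih]
      constructor
      · rintro (hs | ⟨b, hb, hx⟩)
        · exact Or.inl hs
        · exact Or.inr ⟨b, List.mem_cons_of_mem _ hb, hx⟩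
      · rintro (hs | ⟨b, hb, hx⟩)
        · exact Or.inl hs
        · rcases List.mem_cons.mp hb with rfl | hb
          · rw [hj] at hx; cases hx
          · exact Or.inr ⟨b, hb, hx⟩

-- the per-column candidate list, phrased with A's minima
def hfil (K : List (List Int)) (minW minK : List Int) (j : Nat) : List Int :=
  ((List.range K.length).filter (fun i =>
    decide ((K.getD i []).getD j 0 = minW.getD i 0 ∧ (K.getD i []).getD j 0 = minK.getD j 0))).map
    (fun (i : Nat) => (i : Int))

-- B's outer loop splits into its two independent accumulators
theorem fold_split (HH : Nat → List Int) (l : List Nat) (a : PySem.Set Int) (b : List Int) :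
    l.foldl (fun (st : PySem.Set Int × List Int) j =>
        if HH j ≠ [] then (PySem.Set.update st.1 (HH j), st.2 ++ [(j : Int)]) else st) (a, b)
      = (l.foldl (fun s j => if HH j ≠ [] then PySem.Set.update s (HH j) else s) a,
         b ++ (l.filter (fun j => decide (HH j ≠ []))).map (fun (j : Nat) => (j : Int))) := by
  induction l generalizing a b with
  | nil => simp
  | cons j l ih =>
    simp only [List.foldl_cons, List.filter_cons]
    by_cases hj : HH j ≠ []
    · rw [if_pos hj, ih]
      simp [hj]
    · rw [if_neg hj, ih]
      simp [hj]

theorem enum_filter_not (bs : List Bool) (s : Int) :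
    ((PySem.List.enumerate bs s).filter (fun p => !p.2)).map (·.1)
      = ((List.range bs.length).filter (fun k => !(bs.getD k false))).map
        (fun (k : Nat) => s + (k : Int)) :=
  enum_filter_f bs s (fun b => !b)

theorem enum_filter_pos (bs : List Bool) (s : Int) :
    ((PySem.List.enumerate bs s).filter (fun p => p.2)).map (·.1)
      = ((List.range bs.length).filter (fun k => bs.getD k false)).map
        (fun (k : Nat) => s + (k : Int)) :=
  enum_filter_f bs s (fun b => b)

theorem main_core (K : List (List Int)) (minW minK : List Int)
    (hn : 0 < K.length)
    (hrow : ∀ i, i < K.length → (K.getD i []).length = (K.headD []).length)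
    (hminK : ∀ j, j < (K.headD []).length → minK.getD j 0 = cmin K j K.length) :
    (((PySem.List.enumerate (zaznacz K minW minK).1 0).filter (fun p => !p.2)).map (·.1),
     ((PySem.List.enumerate (zaznacz K minW minK).2 0).filter (fun p => p.2)).map (·.1))
    = ((((List.range K.length).filter (fun (i : Nat) =>
          !(PySem.Set.contains ((List.range ((K.headD []).length)).foldl
              (fun (st : PySem.Set Int × List Int) j =>
                let hits := ((List.range K.length).foldl (kolumnaKrok K minW j) (none, [])).2
                if hits ≠ [] then (PySem.Set.update st.1 hits, st.2 ++ [(j : Int)]) else st)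
              (PySem.Set.empty, [])).1 ((i : Nat) : Int)))).map (fun (i : Nat) => (i : Int))),
       ((List.range ((K.headD []).length)).foldl
              (fun (st : PySem.Set Int × List Int) j =>
                let hits := ((List.range K.length).foldl (kolumnaKrok K minW j) (none, [])).2
                if hits ≠ [] then (PySem.Set.update st.1 hits, st.2 ++ [(j : Int)]) else st)
              (PySem.Set.empty, [])).2) := by
  obtain ⟨Hl1, Hl2, Hg1, Hg2⟩ := zaznacz_spec K minW minK hrow
  -- B's outer fold, rewritten column by column via the streaming invariant
  have hfold : (List.range ((K.headD []).length)).foldl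
        (fun (st : PySem.Set Int × List Int) j =>
          let hits := ((List.range K.length).foldl (kolumnaKrok K minW j) (none, [])).2
          if hits ≠ [] then (PySem.Set.update st.1 hits, st.2 ++ [(j : Int)]) else st)
        (PySem.Set.empty, [])
      = (List.range ((K.headD []).length)).foldl
          (fun (st : PySem.Set Int × List Int) j =>
            if hfil K minW minK j ≠ []
            then (PySem.Set.update st.1 (hfil K minW minK j), st.2 ++ [(j : Int)]) else st)
          (PySem.Set.empty, []) := by
    apply PySem.List.foldl_congr_mem'
    intro j hj st
    have hj' := List.mem_range.mp hj
    have hh : ((List.range K.length).foldl (kolumnaKrok K minW j) (none, [])).2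
        = hfil K minW minK j := by
      rw [stream_spec K minW j K.length hn]
      dsimp only
      unfold hfil
      congr 1
      apply List.filter_congr
      intro i _
      rw [hminK j hj']
      exact decide_eq_decide.mpr ⟨fun h => ⟨h.2, h.1⟩, fun h => ⟨h.2, h.1⟩⟩
    simp only [hh]
  rw [hfold, fold_split]
  have hmem : ∀ i : Nat, i < K.length →
      (PySem.Set.contains ((List.range ((K.headD []).length)).foldl
          (fun s j => if hfil K minW minK j ≠ [] then PySem.Set.update s (hfil K minW minK j) else s)
          PySem.Set.empty) ((i : Nat) : Int))
      = (List.range ((K.getD i []).length)).any (fun j =>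
          decide ((K.getD i []).getD j 0 = minW.getD i 0 ∧ (K.getD i []).getD j 0 = minK.getD j 0)) := by
    intro i hiK
    apply Bool.eq_iff_iff.mpr
    rw [PySem.Set.contains_iff, mem_foldl_update, List.any_eq_true]
    constructor
    · rintro (hS | ⟨j, hj, hij⟩)
      · cases hS
      · unfold hfil at hij
        rcases List.mem_map.mp hij with ⟨i', hi', hcast⟩
        have hii : i' = i := by exact_mod_cast hcast
        rcases List.mem_filter.mp hi' with ⟨_, hpred⟩
        rw [hii] at hpred
        refine ⟨j, List.mem_range.mpr ?_, hpred⟩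
        rw [hrow i hiK]
        exact List.mem_range.mp hj
    · rintro ⟨j, hj, hp⟩
      have hjm : j < (K.headD []).length := by
        rw [← hrow i hiK]; exact List.mem_range.mp hj
      refine Or.inr ⟨j, List.mem_range.mpr hjm, ?_⟩
      unfold hfil
      exact List.mem_map.mpr ⟨i, List.mem_filter.mpr ⟨List.mem_range.mpr hiK, hp⟩, rfl⟩
  simp only [Prod.mk.injEq]
  constructor
  · -- rows
    rw [enum_filter_not, Hl1]
    have hpred : ∀ i ∈ List.range K.length,
        (!(zaznacz K minW minK).1.getD i false)
          = (!(PySem.Set.contains ((List.range ((K.headD []).length)).foldl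
              (fun s j => if hfil K minW minK j ≠ []
                then PySem.Set.update s (hfil K minW minK j) else s)
              PySem.Set.empty) ((i : Nat) : Int))) := by
      intro i hi
      rw [Hg1 i, decide_eq_true (List.mem_range.mp hi), Bool.true_and,
        hmem i (List.mem_range.mp hi)]
    rw [List.filter_congr hpred]
    apply List.map_congr_left
    intro x _
    simp
  · -- columns
    rw [enum_filter_pos, Hl2, List.nil_append]
    have hcols : ∀ j ∈ List.range ((K.headD []).length),
        ((zaznacz K minW minK).2.getD j false) = decide (hfil K minW minK j ≠ []) := by
      intro j hj
      have hjm := List.mem_range.mp hj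
      rw [Hg2 j]
      apply Bool.eq_iff_iff.mpr
      rw [List.any_eq_true, decide_eq_true_eq]
      have hnil : (hfil K minW minK j = []) ↔ ∀ i ∈ List.range K.length,
          ¬ ((K.getD i []).getD j 0 = minW.getD i 0 ∧
             (K.getD i []).getD j 0 = minK.getD j 0) := by
        unfold hfil
        rw [List.map_eq_nil_iff, List.filter_eq_nil_iff]
        simp
      constructor
      · rintro ⟨i, hi, hp⟩
        rw [Bool.and_eq_true, decide_eq_true_eq, decide_eq_true_eq] at hp
        intro h0
        exact (hnil.mp h0) i hi hp.2
      · intro hne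
        have hex := mt hnil.mpr hne
        push_neg at hex
        rcases hex with ⟨i, hi, hp⟩
        refine ⟨i, hi, ?_⟩
        rw [Bool.and_eq_true, decide_eq_true_eq, decide_eq_true_eq]
        exact ⟨hjm, hp⟩
    rw [List.filter_congr hcols]
    apply List.map_congr_left
    intro x _
    simp

-- ===== VERDICT (by name: the statement is the Claim_ definition above) =====
theorem wykreslanie_zer_min_linii_spec : Claim_equal_wykreslanie_zer_min_linii := by
  intro koszty _ hpre
  obtain ⟨hne, hm0, hlen⟩ := hpre
  unfold Spec_wykreslanie_zer_min_linii
  simp only [wykreslanie_zer_min_linii, wykreslanie_zer_min_linii_alt]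
  have hn : 0 < koszty.length := List.length_pos_iff.mpr hne
  have hrow : ∀ i, i < koszty.length →
      (koszty.getD i []).length = (koszty.headD []).length := by
    intro i hi
    rw [List.getD_eq_getElem _ _ hi]
    exact hlen _ (List.getElem_mem hi)
  have hminK : ∀ j, j < (koszty.headD []).length →
      ((List.range ((koszty.headD []).length)).map
        (fun j => pyMin (koszty.map (fun w => w.getD j 0)))).getD j 0
      = cmin koszty j koszty.length := by
    intro j hj
    rw [List.getD_eq_getElem _ _ (by simpa using hj)]
    simp only [List.getElem_map, List.getElem_range]
    cases koszty with
    | nil => exact absurd rfl hne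
    | cons w rest => exact (cmin_eq_pyMin w rest j).symm
  exact main_core koszty _ _ hn hrow hminK
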